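-- pv_equiv track=rewrite | github.com/pbylicki/rfhub2 | rfhub2/db/repository/query_utils.py | glob_to_sql
-- ===== SOURCE A (Python) =====
-- def glob_to_sql(string: str) -> str:
--     """Convert glob-like wildcards to SQL wildcards
--
--     * becomes %
--     ? becomes _
--     % becomes \%
--     \\ remains \\
--     \* remains \*
--     \? remains \?
--
--     This also adds a leading and trailing %, unless the pattern begins with
--     ^ or ends with $
--     """
--
--     # What's with the chr(1) and chr(2) nonsense? It's a trick to
--     # hide \* and \? from the * and ? substitutions. This trick
--     # depends on the substitutions being done in order.  chr(1)
--     # and chr(2) were picked because I know those characters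
--     # almost certainly won't be in the input string
--     table = (
--         (r"\\", chr(1)),
--         (r"\*", chr(2)),
--         (r"\?", chr(3)),
--         (r"%", r"\%"),
--         (r"?", "_"),
--         (r"*", "%"),
--         (chr(1), r"\\"),
--         (chr(2), r"\*"),
--         (chr(3), r"\?"),
--     )
--
--     for (a, b) in table:
--         string = string.replace(a, b)
--
--     string = string[1:] if string.startswith("^") else "%" + string
--     string = string[:-1] if string.endswith("$") else string + "%"
--
--     return string
-- ===== SOURCE B (Python) =====
-- def glob_to_sql(string: str) -> str:
--     """Convert glob-like wildcards to SQL wildcards in one left-to-right scan."""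
--     out = []
--     i = 0
--     n = len(string)
--     while i < n:
--         c = string[i]
--         if c == "\\" and i + 1 < n and string[i + 1] in "\\*?":
--             out.append("\\" + string[i + 1])
--             i += 2
--         elif c == "%":
--             out.append("\\%")
--             i += 1
--         elif c == "?":
--             out.append("_")
--             i += 1
--         elif c == "*":
--             out.append("%")
--             i += 1
--         else:
--             out.append(c)
--             i += 1
--     result = "".join(out)
--     result = result[1:] if result.startswith("^") else "%" + result
--     result = result[:-1] if result.endswith("$") else result + "%"
--     return result
-- ===== Notes on version B (the rewrite author's own statement) =====
-- stated objective: alternative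
-- what changed: Replaced the nine ordered str.replace passes with chr(1)/chr(2)/chr(3) sentinel characters by a single left-to-right scan that handles escape pairs and wildcard characters in one pass.
import Mathlib
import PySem

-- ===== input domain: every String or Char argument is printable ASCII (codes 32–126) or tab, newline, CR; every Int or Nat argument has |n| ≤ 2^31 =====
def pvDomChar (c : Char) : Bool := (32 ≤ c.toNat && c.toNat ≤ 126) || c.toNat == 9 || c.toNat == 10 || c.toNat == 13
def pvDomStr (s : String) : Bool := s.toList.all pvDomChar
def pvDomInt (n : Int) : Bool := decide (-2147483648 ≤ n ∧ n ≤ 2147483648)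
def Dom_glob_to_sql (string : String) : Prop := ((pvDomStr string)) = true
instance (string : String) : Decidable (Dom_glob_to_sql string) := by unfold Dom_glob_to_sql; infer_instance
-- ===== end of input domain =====

-- B replaces A's nine ordered str.replace passes (with chr(1)/chr(2)/chr(3) sentinels) by a
-- single left-to-right scan; same return value on the whole domain, no speed claim is made.

-- ===== PORT A =====
-- the shared last two lines of both Pythons: '^' strips / prepend '%', '$' strips / append '%'
def addAnchors (cs : List Char) : List Char :=
  let cs := if PySem.Chars.startswith cs ['^'] then PySem.Chars.slice cs (some 1) none
            else '%' :: cs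
  if PySem.Chars.endswith cs ['$'] then PySem.Chars.slice cs none (some (-1))
  else cs ++ ['%']

def globTable : List (List Char × List Char) :=
  [ (['\\','\\'], [Char.ofNat 1]),
    (['\\','*'],  [Char.ofNat 2]),
    (['\\','?'],  [Char.ofNat 3]),
    (['%'],       ['\\','%']),
    (['?'],       ['_']),
    (['*'],       ['%']),
    ([Char.ofNat 1], ['\\','\\']),
    ([Char.ofNat 2], ['\\','*']),
    ([Char.ofNat 3], ['\\','?']) ]

-- the 'for (a, b) in table: string = string.replace(a, b)' loop
def applyTable (cs : List Char) : List Char :=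
  globTable.foldl (fun s p => PySem.Chars.replace s p.1 p.2) cs

def glob_to_sql (string : String) : String :=
  String.ofList (addAnchors (applyTable string.toList))

-- ===== PORT B =====
-- Source B's single scan: '\' followed by one of '\*?' is copied as the pair, else the branch chain
def scanB : List Char → List Char
  | [] => []
  | c :: rest =>
    if c = '\\' then
      match rest with
      | [] => ['\\']
      | d :: t =>
        if d = '\\' ∨ d = '*' ∨ d = '?' then '\\' :: d :: scanB t
        else '\\' :: scanB (d :: t)
    else if c = '%' then '\\' :: '%' :: scanB rest
    else if c = '?' then '_' :: scanB rest
    else if c = '*' then '%' :: scanB rest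
    else c :: scanB rest

def glob_to_sql_alt (string : String) : String :=
  String.ofList (addAnchors (scanB string.toList))

-- ===== PRECONDITION & SPEC =====
def Spec_glob_to_sql (string : String) (out : String) : Prop := out = glob_to_sql_alt string
instance (string : String) (out : String) : Decidable (Spec_glob_to_sql string out) := by unfold Spec_glob_to_sql; infer_instance

-- ===== CLAIM (what is proved, stated in full; the proofs are below) =====
def Claim_equal_glob_to_sql : Prop := ∀ (string : String), Dom_glob_to_sql string → Spec_glob_to_sql string (glob_to_sql string)

-- ===== LEMMAS AND PROOFS =====

-- unfold equations for PySem.Chars.replace.go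
lemma go_zero (old new l acc : List Char) :
    PySem.Chars.replace.go old new 0 l acc = acc.reverse ++ l := by
  simp [PySem.Chars.replace.go]

lemma go_succ_nil (old new : List Char) (fuel : Nat) (acc : List Char) :
    PySem.Chars.replace.go old new (fuel+1) [] acc = acc.reverse := by
  simp [PySem.Chars.replace.go]

lemma go_succ_cons (old new : List Char) (fuel : Nat) (c : Char) (t acc : List Char) :
    PySem.Chars.replace.go old new (fuel+1) (c::t) acc =
      if old.isPrefixOf (c::t) then
        PySem.Chars.replace.go old new fuel ((c::t).drop old.length) (new.reverse ++ acc)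
      else PySem.Chars.replace.go old new fuel t (c::acc) := by
  rw [PySem.Chars.replace.go.eq_def]

-- go is insensitive to extra fuel and pushes its accumulator out front
lemma go_fuel (old new : List Char) (hold : old ≠ []) :
    ∀ fuel l acc, l.length ≤ fuel →
      PySem.Chars.replace.go old new fuel l acc =
        acc.reverse ++ PySem.Chars.replace.go old new l.length l [] := by
  intro fuel
  induction fuel using Nat.strong_induction_on with
  | _ fuel ih =>
    intro l acc hl
    match fuel, l with
    | 0, l =>
      have : l = [] := List.length_eq_zero_iff.mp (Nat.le_zero.mp hl)
      subst this; simp [go_zero]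
    | n+1, [] => simp [go_succ_nil, go_zero]
    | n+1, c::t =>
      have ho : 1 ≤ old.length := by
        cases old with | nil => exact absurd rfl hold | cons _ _ => simp
      have ht : t.length ≤ n := by simp at hl; omega
      rw [go_succ_cons, show (c::t).length = t.length + 1 from rfl, go_succ_cons]
      by_cases hp : old.isPrefixOf (c::t)
      · simp only [hp, if_true]
        have hdl : (List.drop old.length (c::t)).length ≤ t.length := by
          simp only [List.length_drop]; simp; omega
        rw [ih n (by omega) _ _ (le_trans hdl ht),
            ih t.length (by omega) _ _ hdl]
        simp
      · simp only [hp, Bool.false_eq_true, if_false]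
        rw [ih n (by omega) _ _ ht, ih t.length (by omega) t [c] (le_refl _)]
        simp

-- head-step characterisation of replace (old ≠ [])
lemma replace_cons (old new : List Char) (c : Char) (t : List Char) (hold : old ≠ [])
    (h : old.isPrefixOf (c::t) = false) :
    PySem.Chars.replace (c::t) old new = c :: PySem.Chars.replace t old new := by
  have he : old.isEmpty = false := by cases old with | nil => exact absurd rfl hold | cons _ _ => rfl
  simp only [PySem.Chars.replace, he, Bool.false_eq_true, if_false]
  rw [show (c::t).length = t.length + 1 from rfl, go_succ_cons, h]
  simp only [Bool.false_eq_true, if_false]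
  rw [go_fuel old new hold t.length t [c] (le_refl _)]
  rfl

lemma replace_prefix (old new t : List Char) (hold : old ≠ []) :
    PySem.Chars.replace (old ++ t) old new = new ++ PySem.Chars.replace t old new := by
  have he : old.isEmpty = false := by cases old with | nil => exact absurd rfl hold | cons _ _ => rfl
  simp only [PySem.Chars.replace, he, Bool.false_eq_true, if_false]
  obtain ⟨o, os, rfl⟩ : ∃ o os, old = o :: os := by
    cases old with
    | nil => exact absurd rfl hold
    | cons o os => exact ⟨o, os, rfl⟩
  rw [show ((o::os) ++ t).length = (os ++ t).length + 1 by simp]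
  rw [show ((o::os) : List Char) ++ t = o :: (os ++ t) from rfl, go_succ_cons]
  have hp : (o::os).isPrefixOf (o :: (os ++ t)) = true := by
    rw [List.isPrefixOf_iff_prefix]; exact ⟨t, by simp⟩
  rw [hp]
  simp only [if_true]
  have hd : (o :: (os ++ t)).drop (o::os).length = t := by
    simpa using List.drop_left' (l₁ := o::os) (l₂ := t) (by simp)
  rw [hd]
  rw [go_fuel (o::os) new hold _ _ _ (by simp), List.append_nil]
  simp

-- hit forms with cons-shaped left-hand sides (usable by simp)
lemma replace_hit2 (a b : Char) (new u : List Char) :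
    PySem.Chars.replace (a::b::u) [a,b] new = new ++ PySem.Chars.replace u [a,b] new := by
  have := replace_prefix [a,b] new u (by simp)
  simpa using this

lemma replace_hit1 (a : Char) (new u : List Char) :
    PySem.Chars.replace (a::u) [a] new = new ++ PySem.Chars.replace u [a] new := by
  have := replace_prefix [a] new u (by simp)
  simpa using this

-- the nine replaces written out (definitional unfolding of the foldl over the literal table)
lemma applyTable_eq (cs : List Char) :
    applyTable cs =
      PySem.Chars.replace (PySem.Chars.replace (PySem.Chars.replace (PySem.Chars.replace
        (PySem.Chars.replace (PySem.Chars.replace (PySem.Chars.replace (PySem.Chars.replace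
          (PySem.Chars.replace cs ['\\','\\'] [Char.ofNat 1])
          ['\\','*'] [Char.ofNat 2])
          ['\\','?'] [Char.ofNat 3])
          ['%'] ['\\','%'])
          ['?'] ['_'])
          ['*'] ['%'])
          [Char.ofNat 1] ['\\','\\'])
          [Char.ofNat 2] ['\\','*'])
          [Char.ofNat 3] ['\\','?'] := by
  simp only [applyTable, globTable, List.foldl]

-- chunk lemmas: how the pipeline treats each kind of head
lemma pipe_bsbs (u : List Char) :
    applyTable ('\\'::'\\'::u) = '\\'::'\\'::applyTable u := by
  simp [applyTable_eq, replace_hit2, replace_hit1, replace_cons, List.isPrefixOf]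

lemma pipe_bsst (u : List Char) :
    applyTable ('\\'::'*'::u) = '\\'::'*'::applyTable u := by
  simp [applyTable_eq, replace_hit2, replace_hit1, replace_cons, List.isPrefixOf]

lemma pipe_bsq (u : List Char) :
    applyTable ('\\'::'?'::u) = '\\'::'?'::applyTable u := by
  simp [applyTable_eq, replace_hit2, replace_hit1, replace_cons, List.isPrefixOf]

lemma pipe_pct (u : List Char) :
    applyTable ('%'::u) = '\\'::'%'::applyTable u := by
  simp [applyTable_eq, replace_hit2, replace_hit1, replace_cons, List.isPrefixOf]

lemma pipe_q (u : List Char) :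
    applyTable ('?'::u) = '_'::applyTable u := by
  simp [applyTable_eq, replace_hit2, replace_hit1, replace_cons, List.isPrefixOf]

lemma pipe_st (u : List Char) :
    applyTable ('*'::u) = '%'::applyTable u := by
  simp [applyTable_eq, replace_hit2, replace_hit1, replace_cons, List.isPrefixOf]

lemma pipe_bs_nil : applyTable ['\\'] = ['\\'] := by decide

lemma pipe_bs_lone (d : Char) (u : List Char)
    (h1 : d ≠ '\\') (h2 : d ≠ '*') (h3 : d ≠ '?') :
    applyTable ('\\'::d::u) = '\\'::applyTable (d::u) := by
  have h1' := Ne.symm h1; have h2' := Ne.symm h2; have h3' := Ne.symm h3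
  simp [applyTable_eq, replace_cons, List.isPrefixOf, h1', h2', h3']

lemma pipe_other (c : Char) (u : List Char)
    (h1 : c ≠ '\\') (h2 : c ≠ '%') (h3 : c ≠ '?') (h4 : c ≠ '*')
    (h5 : c ≠ Char.ofNat 1) (h6 : c ≠ Char.ofNat 2) (h7 : c ≠ Char.ofNat 3) :
    applyTable (c::u) = c::applyTable u := by
  have h1' := Ne.symm h1; have h2' := Ne.symm h2; have h3' := Ne.symm h3
  have h4' := Ne.symm h4; have h5' := Ne.symm h5; have h6' := Ne.symm h6
  have h7' := Ne.symm h7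
  simp [applyTable_eq, replace_hit2, replace_hit1, replace_cons, List.isPrefixOf,
        h1, h2, h3, h4, h5, h6, h7, h1', h2', h3', h4', h5', h6', h7']

lemma dom_no_sentinel (c : Char) (h : pvDomChar c = true) :
    c ≠ Char.ofNat 1 ∧ c ≠ Char.ofNat 2 ∧ c ≠ Char.ofNat 3 := by
  refine ⟨?_, ?_, ?_⟩ <;> intro he <;> rw [he] at h <;> exact absurd h (by decide)

-- the heart of the proof: the nine-pass pipeline equals the single scan on sentinel-free input
lemma pipeline_eq_scan :
    ∀ n (cs : List Char), cs.length ≤ n → (∀ c ∈ cs, pvDomChar c = true) →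
      applyTable cs = scanB cs := by
  intro n
  induction n with
  | zero =>
    intro cs hl _
    have : cs = [] := List.length_eq_zero_iff.mp (Nat.le_zero.mp hl)
    subst this; decide
  | succ n ih =>
    intro cs hl hdom
    match cs with
    | [] => decide
    | c :: t =>
      have hdt : ∀ x ∈ t, pvDomChar x = true := fun x hx => hdom x (List.mem_cons_of_mem _ hx)
      by_cases hbs : c = '\\'
      · subst hbs
        match t with
        | [] => exact pipe_bs_nil
        | d :: t' =>
          have hdt' : ∀ x ∈ t', pvDomChar x = true :=
            fun x hx => hdt x (List.mem_cons_of_mem _ hx)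
          have hlt' : t'.length ≤ n := by simp at hl; omega
          by_cases hd1 : d = '\\'
          · subst hd1
            rw [pipe_bsbs, ih t' hlt' hdt']
            conv_rhs => rw [scanB.eq_def]
            simp
          · by_cases hd2 : d = '*'
            · subst hd2
              rw [pipe_bsst, ih t' hlt' hdt']
              conv_rhs => rw [scanB.eq_def]
              simp
            · by_cases hd3 : d = '?'
              · subst hd3
                rw [pipe_bsq, ih t' hlt' hdt']
                conv_rhs => rw [scanB.eq_def]
                simp
              · have hlrest : (d::t').length ≤ n := by simp at hl ⊢; omega
                rw [pipe_bs_lone d t' hd1 hd2 hd3, ih (d::t') hlrest hdt]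
                conv_rhs => rw [scanB.eq_def]
                simp [hd1, hd2, hd3]
      · have hlt : t.length ≤ n := by simp at hl; omega
        by_cases hp : c = '%'
        · subst hp
          rw [pipe_pct, ih t hlt hdt]
          conv_rhs => rw [scanB.eq_def]
          simp
        · by_cases hq : c = '?'
          · subst hq
            rw [pipe_q, ih t hlt hdt]
            conv_rhs => rw [scanB.eq_def]
            simp
          · by_cases hs : c = '*'
            · subst hs
              rw [pipe_st, ih t hlt hdt]
              conv_rhs => rw [scanB.eq_def]
              simp
            · obtain ⟨h5, h6, h7⟩ := dom_no_sentinel c (hdom c (List.mem_cons_self ..))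
              rw [pipe_other c t hbs hp hq hs h5 h6 h7, ih t hlt hdt]
              conv_rhs => rw [scanB.eq_def]
              simp [hbs, hp, hq, hs]

-- ===== VERDICT (by name: the statement is the Claim_ definition above) =====
theorem glob_to_sql_spec : Claim_equal_glob_to_sql := by
  intro string hdom
  unfold Spec_glob_to_sql glob_to_sql glob_to_sql_alt
  have hchars : ∀ c ∈ string.toList, pvDomChar c = true :=
    List.all_eq_true.mp hdom
  rw [pipeline_eq_scan string.toList.length string.toList (le_refl _) hchars]
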